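-- pv_equiv track=rewrite | github.com/Ilyes-Origamist/IEEEXtreme-ENP | Solved problems/IEEEXtreme/Hard/xtreme-rapper.py | nb_words
-- ===== SOURCE A (Python) =====
-- def nb_words(K, J):
--     if K+J<3 or K==0 or J==0:
--         return 0
--     else: # descending order
--         if K==J:
--             remaining=(2*K)%3
--             ans=2*K//3
--             if remaining ==2: return ans+1
--             else: return ans
--         elif J<K: words=[K, J]
--         else: words=[J, K]
--
--     if words[0]//words[1]>=2:
--         return words[1]
--     else:
--         ans=0
--         while (words[0]!=0 and words[1]!=0 and words[0]+words[1]>=3 and words[0]!=words[1]):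
--             words[0]-=2
--             words[1]-=1
--             ans+=1
--         if words[0]==words[1]:
--             ans+=2*words[0]//3
--             remaining=(2*words[0])%3
--             if remaining ==2: return ans+1
--             else: return ans
--         else: # meaning there is no more than a word for each of them
--             return ans
-- ===== SOURCE B (Python) =====
-- def nb_words(K, J):
--     # Closed form: each word needs 3 syllables overall and at least one of each
--     # kind, so the answer is capped by each count and by the syllable total.
--     if K == 0 or J == 0 or K + J < 3:
--         return 0
--     return min(K, J, (K + J + 1) // 3)
-- ===== Notes on version B (the rewrite author's own statement) =====
-- stated objective: faster
-- what changed: A's O(min(K,J)) subtraction loop is replaced by the closed-form O(1) formula min(K, J, (K+J+1)//3); Pre_ restricts to the natural domain of nonnegative syllable counts, because on negative counts A's loop behaviour is an accident of its implementation that no natural rewrite would reproduce.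
-- outside the precondition, e.g. on nb_words(5, -1): A returns 1, B returns -1; on nb_words(-2, 7): A returns 1, B returns -2
import Mathlib
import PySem

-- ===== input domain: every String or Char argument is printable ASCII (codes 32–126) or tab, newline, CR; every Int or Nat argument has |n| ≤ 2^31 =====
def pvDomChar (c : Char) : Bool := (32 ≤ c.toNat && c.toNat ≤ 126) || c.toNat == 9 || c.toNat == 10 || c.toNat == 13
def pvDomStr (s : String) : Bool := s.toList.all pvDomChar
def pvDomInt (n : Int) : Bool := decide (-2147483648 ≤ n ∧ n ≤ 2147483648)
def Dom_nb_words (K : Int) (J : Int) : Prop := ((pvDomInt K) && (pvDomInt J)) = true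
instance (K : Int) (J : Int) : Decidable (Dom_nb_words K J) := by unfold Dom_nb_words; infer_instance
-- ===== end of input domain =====

-- B replaces A's step-by-step subtraction loop by a closed-form O(1) formula; equality is proved on nonnegative counts (Pre_).

-- ===== PORT A =====
-- A's while loop, on the state (words[0], words[1], ans)
def nbLoop (a : Int) (b : Int) (ans : Int) : Int × Int × Int :=
  if a ≠ 0 ∧ b ≠ 0 ∧ 3 ≤ a + b ∧ a ≠ b then nbLoop (a - 2) (b - 1) (ans + 1)
  else (a, b, ans)
termination_by (a + b).toNat
decreasing_by omega

def nb_words (K : Int) (J : Int) : Int :=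
  if K + J < 3 ∨ K = 0 ∨ J = 0 then 0
  else if K = J then
    let remaining := PySem.Int.mod (2 * K) 3
    let ans := PySem.Int.floordiv (2 * K) 3
    if remaining = 2 then ans + 1 else ans
  else
    let words : Int × Int := if J < K then (K, J) else (J, K)
    if 2 ≤ PySem.Int.floordiv words.1 words.2 then words.2
    else
      let r := nbLoop words.1 words.2 0
      if r.1 = r.2.1 then
        let ans := r.2.2 + PySem.Int.floordiv (2 * r.1) 3
        if PySem.Int.mod (2 * r.1) 3 = 2 then ans + 1 else ans
      else r.2.2

-- ===== PORT B =====
def nb_words_alt (K : Int) (J : Int) : Int :=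
  if K = 0 ∨ J = 0 ∨ K + J < 3 then 0
  else min (min K J) (PySem.Int.floordiv (K + J + 1) 3)

-- ===== PRECONDITION & SPEC =====
-- Pre_ restricts to the natural domain of nonnegative syllable counts; A also returns on
-- negative counts, but its value there is an accident of its subtraction loop that no
-- natural implementation would reproduce, so those inputs are excluded.
def Pre_nb_words (K : Int) (J : Int) : Prop := 0 ≤ K ∧ 0 ≤ J
instance (K : Int) (J : Int) : Decidable (Pre_nb_words K J) := by unfold Pre_nb_words; infer_instance
def pvWitness_nb_words : Int × Int := (5, 4)

def Spec_nb_words (K : Int) (J : Int) (out : Int) : Prop := out = nb_words_alt K J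
instance (K : Int) (J : Int) (out : Int) : Decidable (Spec_nb_words K J out) := by unfold Spec_nb_words; infer_instance

-- ===== CLAIM (what is proved, stated in full; the proofs are below) =====
def Claim_equal_nb_words : Prop :=
  ∀ (K : Int) (J : Int), Dom_nb_words K J → Pre_nb_words K J → Spec_nb_words K J (nb_words K J)

-- ===== LEMMAS AND PROOFS =====

-- case 0 < b < a < 2b: the loop runs exactly a-b = d steps and ends with both entries equal to 2b-a
lemma nbLoop_pos (d : Nat) : ∀ (b ans : Int), 0 < b → 1 ≤ (d : Int) → (d : Int) < b →
    nbLoop (b + d) b ans = (b - d, b - d, ans + d) := by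
  induction d with
  | zero => intro b ans _ h1 _; norm_num at h1
  | succ d ih =>
    intro b ans hb _ hdb
    rw [nbLoop, if_pos (by push_cast; omega)]
    rcases Nat.eq_zero_or_pos d with hd | hd
    · subst hd
      rw [nbLoop, if_neg (by push_cast; omega)]
      push_cast
      refine Prod.ext (by ring) (Prod.ext (by ring) (by ring))
    · have harg : b + ((d : Int) + 1) - 2 = (b - 1) + d := by ring
      push_cast
      rw [harg, ih (b - 1) (ans + 1) (by push_cast at hdb ⊢; omega)
            (by exact_mod_cast hd) (by push_cast at hdb ⊢; omega)]
      refine Prod.ext (by ring) (Prod.ext (by ring) (by ring))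

-- A's descending-order core (a = max, b = min, both positive, a > b) against B's closed form
lemma nb_core (a b : Int) (hb : 0 < b) (hab : b < a) (hs : 3 ≤ a + b) :
    (if 2 ≤ PySem.Int.floordiv a b then b
     else
       let r := nbLoop a b 0
       if r.1 = r.2.1 then
         let ans := r.2.2 + PySem.Int.floordiv (2 * r.1) 3
         if PySem.Int.mod (2 * r.1) 3 = 2 then ans + 1 else ans
       else r.2.2)
    = min b (PySem.Int.floordiv (a + b + 1) 3) := by
  rw [PySem.Int.floordiv_eq_ediv_of_pos hb,
      PySem.Int.floordiv_eq_ediv_of_pos (show (0:Int) < 3 by norm_num)]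
  have hdm := Int.mul_ediv_add_emod a b
  have hm0 := Int.emod_nonneg a (ne_of_gt hb)
  have hmb := Int.emod_lt_of_pos a hb
  by_cases h2 : 2 ≤ a / b
  · have h2' : 2 * b ≤ a := by
      have := mul_le_mul_of_nonneg_left h2 hb.le
      linarith
    rw [if_pos h2, min_eq_left (by omega)]
  · have h2' : a < 2 * b := by
      have hq1 : a / b ≤ 1 := by omega
      have := mul_le_mul_of_nonneg_left hq1 hb.le
      linarith
    rw [if_neg h2]
    have hl : nbLoop a b 0 =
        (b - ((a - b).toNat : Int), b - ((a - b).toNat : Int), 0 + ((a - b).toNat : Int)) := by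
      have ha : a = b + ((a - b).toNat : Int) := by omega
      conv_lhs => rw [ha]
      exact nbLoop_pos (a - b).toNat b 0 hb (by omega) (by omega)
    simp only [hl, if_true]
    rw [PySem.Int.floordiv_eq_ediv_of_pos (show (0:Int) < 3 by norm_num),
        PySem.Int.mod_eq_emod_of_pos (show (0:Int) < 3 by norm_num)]
    split_ifs <;> omega

lemma nb_words_eq_alt (K J : Int) (hK : 0 ≤ K) (hJ : 0 ≤ J) :
    nb_words K J = nb_words_alt K J := by
  unfold nb_words nb_words_alt
  by_cases h0 : K + J < 3 ∨ K = 0 ∨ J = 0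
  · rw [if_pos h0, if_pos (by omega)]
  · push Not at h0
    obtain ⟨hs, hK0, hJ0⟩ := h0
    rw [if_neg (by omega : ¬(K + J < 3 ∨ K = 0 ∨ J = 0)), if_neg (by omega : ¬(K = 0 ∨ J = 0 ∨ K + J < 3))]
    by_cases hKJ : K = J
    · subst hKJ
      rw [if_pos rfl,
          PySem.Int.floordiv_eq_ediv_of_pos (show (0:Int) < 3 by norm_num),
          PySem.Int.mod_eq_emod_of_pos (show (0:Int) < 3 by norm_num)]
      simp only [min_self]
      rw [PySem.Int.floordiv_eq_ediv_of_pos (show (0:Int) < 3 by norm_num)]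
      split_ifs <;> omega
    · rw [if_neg hKJ]
      by_cases hJK : J < K
      · simp only [if_pos hJK]
        rw [nb_core K J (by omega) hJK (by omega), min_eq_right hJK.le]
      · have hKJ' : K < J := by omega
        simp only [if_neg hJK]
        rw [nb_core J K (by omega) hKJ' (by omega), min_eq_left hKJ'.le,
            show J + K = K + J from by ring]

-- ===== VERDICT (by name: the statement is the Claim_ definition above) =====
theorem nb_words_spec : Claim_equal_nb_words := by
  intro K J _ hpre
  unfold Spec_nb_words
  exact nb_words_eq_alt K J hpre.1 hpre.2
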